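-- pv_equiv track=rewrite | github.com/daniel-reich/ubiquitous-fiesta | dHGpjWHJ265BCthiM_23.py | current_streak
-- ===== SOURCE A (Python) =====
-- def current_streak(today, lst):
--     streak = 0
--     days = list(map(lambda x: x["date"], lst))
--     if days and days[-1] == today:
--         streak = 1
--         for i in range(1, len(days)):
--             gap = int(days[-i][-2:]) - int(days[-i-1][-2:])
--             if gap != 1:
--                 break
--             streak += 1
--     return streak
-- ===== SOURCE B (Python) =====
-- def _day(s):
--     try:
--         return int(s[-2:])
--     except ValueError:
--         return None
--
--
-- def current_streak(today, lst):
--     days = [x["date"] for x in lst]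
--     if not days or days[-1] != today:
--         return 0
--     nums = [_day(d) for d in days]
--     run = 1
--     for prev, cur in zip(nums, nums[1:]):
--         run = run + 1 if prev is not None and cur is not None and cur - prev == 1 else 1
--     return run
-- ===== Notes on version B (the rewrite author's own statement) =====
-- stated objective: alternative
-- what changed: A scans backwards from the end with negative indices, re-parsing each date and breaking at the first non-unit gap; B safely parses every date once into an Optional day number and does one forward pass over zipped adjacent pairs maintaining a running streak that resets on a non-unit or unparseable pair, returning the run ending at the last element.
import Mathlib
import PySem

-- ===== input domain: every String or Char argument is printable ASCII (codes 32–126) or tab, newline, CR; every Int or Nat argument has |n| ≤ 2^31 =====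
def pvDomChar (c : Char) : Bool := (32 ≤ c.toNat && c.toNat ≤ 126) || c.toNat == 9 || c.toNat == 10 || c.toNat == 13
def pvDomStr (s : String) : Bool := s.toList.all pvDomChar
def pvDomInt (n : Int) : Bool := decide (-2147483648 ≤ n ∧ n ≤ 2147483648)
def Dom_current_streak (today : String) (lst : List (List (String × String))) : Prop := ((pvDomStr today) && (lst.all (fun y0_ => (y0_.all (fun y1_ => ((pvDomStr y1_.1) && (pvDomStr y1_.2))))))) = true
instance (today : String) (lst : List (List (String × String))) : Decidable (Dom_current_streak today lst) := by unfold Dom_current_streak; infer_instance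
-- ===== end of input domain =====

-- B replaces A's backward scan (negative indices, early break) by one forward pass over
-- zipped adjacent safely-parsed day numbers with a resetting run counter; same return value
-- wherever A returns (Pre_ excludes only the inputs where A raises).

-- shared primitives of both Pythons: x["date"] (totalized with ""; Pre_ demands the key),
-- int(d[-2:]) as an Option (none = ValueError), and its totalization used by port A
def pvDate (x : List (String × String)) : String :=
  ((PySem.Dict.mk x).get? "date").getD ""

def pvDay? (s : String) : Option Int :=
  PySem.Int.ofChars? (PySem.List.slice s.toList (some (-2)) none)

def pvDay (s : String) : Int :=
  (pvDay? s).getD 0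

-- ===== PORT A =====
-- for i in range(1, len(days)): gap = int(days[-i][-2:]) - int(days[-i-1][-2:]); break / streak += 1
def pvLoopA (days : List String) : Int → List Int → Int
  | streak, [] => streak
  | streak, i :: is =>
    let gap : Int := pvDay (PySem.List.pyGetD days (-i) "") - pvDay (PySem.List.pyGetD days (-i - 1) "")
    if gap ≠ 1 then streak else pvLoopA days (streak + 1) is

def current_streak (today : String) (lst : List (List (String × String))) : Int :=
  let days := lst.map pvDate
  match PySem.List.pyGet? days (-1) with          -- days and days[-1]
  | none => 0
  | some last =>
    if last = today then pvLoopA days 1 (PySem.List.pyRange 1 days.length 1) else 0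

-- ===== PORT B =====
-- forward pass: run = run + 1 if prev is not None and cur is not None and cur - prev == 1 else 1
def pvRunB : Int → List (Option Int × Option Int) → Int
  | run, [] => run
  | run, (p, c) :: t =>
      pvRunB (if p.isSome && c.isSome && (c.getD 0 - p.getD 0 == 1) then run + 1 else 1) t

def current_streak_alt (today : String) (lst : List (List (String × String))) : Int :=
  let days := lst.map pvDate
  match PySem.List.pyGet? days (-1) with          -- not days or days[-1] != today
  | none => 0
  | some last =>
    if last ≠ today then 0
    else
      let nums := days.map pvDay?               -- _day: int(d[-2:]) or None on ValueError
      pvRunB 1 (nums.zip (nums.drop 1))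

-- ===== PRECONDITION & SPEC =====
-- A raises (never returns) exactly when: an element lacks the "date" key (KeyError), or the
-- last date equals today and the backward unit-gap chain of parsed day numbers runs into an
-- unparseable date before any non-unit gap stops the loop (ValueError).
-- pvNoLazyRaise rev: A's backward loop over rev(ersed day numbers) never hits an int() failure:
-- either every date parses, or a non-unit gap occurs inside the parseable prefix first.
-- consecutive unit gaps (earlier - later = 1) along a list of day numbers
def pvUnitChain : List Int → Bool
  | a :: b :: t => (a - b == 1) && pvUnitChain (b :: t)
  | _ => true

def pvNoLazyRaise (l : List (Option Int)) : Prop :=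
  2 ≤ l.length →
    ((l.takeWhile Option.isSome).length = l.length ∨
     pvUnitChain ((l.takeWhile Option.isSome).map (Option.getD · 0)) = false)

-- Pre_ excludes exactly the inputs on which Python A raises (KeyError / ValueError as above);
-- A returns on every input satisfying Pre_.
def Pre_current_streak (today : String) (lst : List (List (String × String))) : Prop :=
  (∀ x ∈ lst, ((PySem.Dict.mk x).get? "date").isSome) ∧
  ((lst.map pvDate).getLast? = some today →
    pvNoLazyRaise ((lst.map pvDate).map pvDay?).reverse)
instance (today : String) (lst : List (List (String × String))) : Decidable (Pre_current_streak today lst) := by unfold Pre_current_streak pvNoLazyRaise; infer_instance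

def pvWitness_current_streak : String × (List (List (String × String))) :=
  ("07", [[("date", "06")], [("date", "07")]])

def Spec_current_streak (today : String) (lst : List (List (String × String))) (out : Int) : Prop := out = current_streak_alt today lst
instance (today : String) (lst : List (List (String × String))) (out : Int) : Decidable (Spec_current_streak today lst out) := by unfold Spec_current_streak; infer_instance

-- ===== CLAIM (what is proved, stated in full; the proofs are below) =====
def Claim_equal_current_streak : Prop := ∀ (today : String) (lst : List (List (String × String))), Dom_current_streak today lst → Pre_current_streak today lst → Spec_current_streak today lst (current_streak today lst)


-- ===== LEMMAS AND PROOFS =====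

-- trailing-while-consecutive count of a reversed Int list, read from its head (A's totalized view)
def twc : List Int → Int
  | a :: b :: t => if a - b = 1 then twc (b :: t) + 1 else 0
  | _ => 0

theorem twc_short (l : List Int) (h : l.length ≤ 1) : twc l = 0 := by
  match l with
  | [] => rfl
  | [a] => rfl
  | a :: b :: t => simp at h

-- the Option-level step of B: both parsed and unit gap (rev orientation: earlier - later = 1)
def stepO (a b : Option Int) : Bool :=
  a.isSome && b.isSome && (a.getD 0 - b.getD 0 == 1)

def twcO : List (Option Int) → Int
  | a :: b :: t => if stepO a b then twcO (b :: t) + 1 else 0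
  | _ => 0

-- the whole list is a stepping chain continuing p
def chainO : Option Int → List (Option Int) → Bool
  | _, [] => true
  | p, x :: xs => stepO x p && chainO x xs

theorem twcO_chain (l : List (Option Int)) (p : Option Int) (t : List (Option Int))
    (h : chainO p l = true) :
    twcO (l.reverse ++ p :: t) = (l.length : Int) + twcO (p :: t) := by
  induction l generalizing p t with
  | nil => simp
  | cons x xs ih =>
    simp only [chainO, Bool.and_eq_true] at h
    have := ih x (p :: t) h.2
    simp only [List.reverse_cons, List.append_assoc, List.cons_append, List.nil_append] at this ⊢
    rw [this]
    have h2 : twcO (x :: p :: t) = twcO (p :: t) + 1 := by simp [twcO, h.1]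
    rw [h2]
    simp only [List.length_cons]
    push_cast
    ring

theorem twcO_append_of_broken (rs t : List (Option Int)) (h : twcO rs + 2 ≤ (rs.length : Int)) :
    twcO (rs ++ t) = twcO rs := by
  match rs with
  | [] => simp [twcO] at h
  | [a] => simp [twcO] at h
  | a :: b :: r =>
    cases hab : stepO a b with
    | true =>
      have h' : twcO (b :: r) + 2 ≤ ((b :: r).length : Int) := by
        simp only [twcO, hab, if_true, List.length_cons] at h ⊢
        push_cast at h ⊢; omega
      have := twcO_append_of_broken (b :: r) t h'
      simp only [List.cons_append] at this ⊢
      simp only [twcO, hab, if_true] at *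
      omega
    | false => simp only [List.cons_append, twcO, hab, Bool.false_eq_true, if_false]

theorem twcO_broken (l : List (Option Int)) (p : Option Int) (h : chainO p l = false) :
    twcO (l.reverse ++ [p]) + 2 ≤ (l.length : Int) + 1 := by
  induction l generalizing p with
  | nil => simp [chainO] at h
  | cons x xs ih =>
    simp only [chainO, Bool.and_eq_false_iff] at h
    simp only [List.reverse_cons, List.append_assoc, List.cons_append, List.nil_append,
      List.length_cons]
    by_cases hc : chainO x xs = true
    · -- the chain above x is intact, so the break is at the pair (x, p)
      have hx : stepO x p = false := by
        rcases h with h | h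
        · exact h
        · rw [hc] at h; exact absurd h (by simp)
      have hch := twcO_chain xs x [p] hc
      rw [hch]
      have h0 : twcO [x, p] = 0 := by simp [twcO, hx]
      rw [h0]
      push_cast
      omega
    · have hxs := ih x (by simpa using hc)
      have hb : twcO (xs.reverse ++ [x]) + 2 ≤ ((xs.reverse ++ [x]).length : Int) := by
        simp only [List.length_append, List.length_reverse, List.length_cons, List.length_nil]
        push_cast
        omega
      have happ := twcO_append_of_broken (xs.reverse ++ [x]) [p] hb
      simp only [List.append_assoc, List.cons_append, List.nil_append] at happ
      rw [happ]
      push_cast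
      omega

-- B's fold, stated over (prev, rest) instead of the zipped pairs
def goRunO : Int → Option Int → List (Option Int) → Int
  | run, _, [] => run
  | run, p, x :: xs => goRunO (if stepO x p then run + 1 else 1) x xs

theorem pvRunB_cond (p c : Option Int) :
    (p.isSome && c.isSome && (c.getD 0 - p.getD 0 == 1)) = stepO c p := by
  cases p <;> cases c <;> simp [stepO]

theorem pvRunB_zip (l : List (Option Int)) (p : Option Int) (run : Int) :
    pvRunB run ((p :: l).zip l) = goRunO run p l := by
  induction l generalizing p run with
  | nil => rfl
  | cons x xs ih =>
    simp only [List.zip_cons_cons, pvRunB, goRunO, pvRunB_cond]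
    exact ih x _

theorem goRunO_eq (l : List (Option Int)) (p : Option Int) (run : Int) :
    goRunO run p l =
      if chainO p l then run + (l.length : Int) else 1 + twcO (l.reverse ++ [p]) := by
  induction l generalizing p run with
  | nil => simp [goRunO, chainO]
  | cons x xs ih =>
    simp only [goRunO, List.reverse_cons, List.append_assoc, List.cons_append, List.nil_append,
      List.length_cons]
    rw [ih x _]
    have hbroken : chainO x xs = false →
        twcO (xs.reverse ++ x :: [p]) = twcO (xs.reverse ++ [x]) := by
      intro hc
      have hxs := twcO_broken xs x hc
      have hb : twcO (xs.reverse ++ [x]) + 2 ≤ ((xs.reverse ++ [x]).length : Int) := by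
        have hl : (xs.reverse ++ [x]).length = xs.length + 1 := by simp
        rw [hl]
        push_cast
        omega
      have happ := twcO_append_of_broken (xs.reverse ++ [x]) [p] hb
      simpa [List.append_assoc] using happ
    cases hx : stepO x p with
    | true =>
      have hch : chainO p (x :: xs) = chainO x xs := by simp [chainO, hx]
      rw [hch]
      cases hc : chainO x xs with
      | true =>
        simp only [if_true]
        push_cast
        ring
      | false =>
        simp only [Bool.false_eq_true, if_false]
        rw [hbroken hc]
    | false =>
      have hch : chainO p (x :: xs) = false := by simp [chainO, hx]
      rw [hch]
      simp only [Bool.false_eq_true, if_false]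
      cases hc : chainO x xs with
      | true =>
        simp only [if_true]
        have hch2 := twcO_chain xs x [p] hc
        rw [hch2]
        have h0 : twcO [x, p] = 0 := by simp [twcO, hx]
        rw [h0]
        ring
      | false =>
        simp only [Bool.false_eq_true, if_false]
        rw [hbroken hc]

theorem goRunO_one (p : Option Int) (l : List (Option Int)) :
    goRunO 1 p l = 1 + twcO (l.reverse ++ [p]) := by
  rw [goRunO_eq]
  cases hc : chainO p l with
  | true =>
    have := twcO_chain l p [] hc
    have h1 : twcO [p] = 0 := rfl
    simp only [if_true]
    rw [this, h1]
    ring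
  | false => simp

-- A's backward loop computes streak + twc of the reversed (totalized) day numbers from position j
theorem pvLoopA_eq (days : List String) (k : Nat) :
    ∀ (j : Nat) (streak : Int), days.length - j = k →
      pvLoopA days streak (PySem.List.pyRange ((j : Int) + 1) (days.length : Int) 1) =
        streak + twc ((days.map pvDay).reverse.drop j) := by
  induction k with
  | zero =>
    intro j streak hk
    have hle : (days.length : Int) ≤ (j : Int) + 1 := by omega
    rw [PySem.List.pyRange_one_eq_nil hle]
    have hdl : ((days.map pvDay).reverse.drop j).length = days.length - j := by simp
    rw [twc_short _ (by omega)]; simp [pvLoopA]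
  | succ k ih =>
    intro j streak hk
    by_cases hj : days.length ≤ j + 1
    · have hle : (days.length : Int) ≤ (j : Int) + 1 := by omega
      rw [PySem.List.pyRange_one_eq_nil hle]
      have hdl : ((days.map pvDay).reverse.drop j).length = days.length - j := by simp
      rw [twc_short _ (by omega)]; simp [pvLoopA]
    · have hjn : j + 1 < days.length := by omega
      have hlt : ((j : Int) + 1) < (days.length : Int) := by omega
      rw [PySem.List.pyRange_one_cons hlt]
      have hg1 : PySem.List.pyGetD days (-((j : Int) + 1)) "" = days[days.length - (j + 1)]'(by omega) := by
        have : (-((j : Int) + 1)) = -(((j + 1 : Nat) : Int)) := by push_cast; ring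
        rw [this, PySem.List.pyGetD_neg_natCast days (j + 1) "" (by omega) (by omega)]
      have hg2 : PySem.List.pyGetD days (-((j : Int) + 1) - 1) "" = days[days.length - (j + 2)]'(by omega) := by
        have : (-((j : Int) + 1) - 1) = -(((j + 2 : Nat) : Int)) := by push_cast; ring
        rw [this, PySem.List.pyGetD_neg_natCast days (j + 2) "" (by omega) (by omega)]
      have hrl : (days.map pvDay).reverse.length = days.length := by simp
      have hdrop : (days.map pvDay).reverse.drop j =
          pvDay (days[days.length - (j + 1)]'(by omega)) ::
          pvDay (days[days.length - (j + 2)]'(by omega)) :: (days.map pvDay).reverse.drop (j + 2) := by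
        have hlen : (days.map pvDay).reverse.length = days.length := by simp
        have hml : (days.map pvDay).length = days.length := by simp
        rw [List.drop_eq_getElem_cons (by omega), List.drop_eq_getElem_cons (by omega)]
        congr 1
        · rw [List.getElem_reverse, List.getElem_map]
          congr 1
          congr 1
          simp only [List.length_map]
          omega
        · congr 1
          rw [List.getElem_reverse, List.getElem_map]
          congr 1
          congr 1
          simp only [List.length_map]
          omega
      simp only [pvLoopA, hg1, hg2]
      by_cases hgap : pvDay (days[days.length - (j + 1)]'(by omega)) -
          pvDay (days[days.length - (j + 2)]'(by omega)) = 1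
      · simp only [hgap, ne_eq, not_true_eq_false, ite_false]
        have harg : ((j : Int) + 1) + 1 = ((j + 1 : Nat) : Int) + 1 := by push_cast; ring
        rw [harg, ih (j + 1) (streak + 1) (by omega)]
        rw [hdrop]
        have : (days.map pvDay).reverse.drop (j + 1) =
            pvDay (days[days.length - (j + 2)]'(by omega)) :: (days.map pvDay).reverse.drop (j + 2) := by
          have hlen : (days.map pvDay).reverse.length = days.length := by simp
          have hml : (days.map pvDay).length = days.length := by simp
          rw [List.drop_eq_getElem_cons (by omega)]
          congr 1
          rw [List.getElem_reverse, List.getElem_map]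
          congr 1
          congr 1
          simp only [List.length_map]
          omega
        rw [this]
        simp only [twc, hgap, if_pos]
        ring
      · simp only [hgap, ne_eq, not_false_eq_true, ite_true]
        rw [hdrop]
        simp only [twc, hgap, ite_false]
        ring

-- under pvNoLazyRaise, A's totalized twc equals B's Option-aware twcO
theorem twc_eq_twcO (l : List (Option Int)) (h : pvNoLazyRaise l) :
    twc (l.map (Option.getD · 0)) = twcO l := by
  match l with
  | [] => rfl
  | [a] => rfl
  | none :: b :: t =>
    exfalso
    have h2 : 2 ≤ (none :: b :: t : List (Option Int)).length := by simp
    have := h h2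
    simp [List.takeWhile, pvUnitChain] at this
  | some x :: none :: t =>
    exfalso
    have h2 : 2 ≤ (some x :: none :: t : List (Option Int)).length := by simp
    have := h h2
    simp [List.takeWhile, pvUnitChain] at this
  | some x :: some y :: t =>
    by_cases hxy : x - y = 1
    · have htail : pvNoLazyRaise (some y :: t) := by
        intro hlen
        have h2 : 2 ≤ (some x :: some y :: t : List (Option Int)).length := by simp
        have := h h2
        rcases this with hall | hbr
        · left
          simp only [List.takeWhile, Option.isSome_some, List.length_cons] at hall ⊢
          omega
        · right
          simp only [List.takeWhile, Option.isSome_some, List.map_cons, Option.getD_some,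
            pvUnitChain, hxy, beq_self_eq_true, Bool.true_and] at hbr ⊢
          exact hbr
      have := twc_eq_twcO (some y :: t) htail
      have hstep : stepO (some x) (some y) = true := by simp [stepO, hxy]
      simp only [List.map_cons, Option.getD_some, twc, twcO, hxy, hstep, if_pos] at this ⊢
      omega
    · have hstep : stepO (some x) (some y) = false := by simp [stepO, hxy]
      simp only [List.map_cons, Option.getD_some, twc, twcO, hxy, hstep, Bool.false_eq_true,
        if_false]

-- both sides equal 1 + (the same count) over the reversed day numbers
theorem ports_agree (today : String) (lst : List (List (String × String)))
    (hpre : Pre_current_streak today lst) :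
    current_streak today lst = current_streak_alt today lst := by
  simp only [current_streak, current_streak_alt]
  cases hd : lst.map pvDate with
  | nil => simp [PySem.List.pyGet?]
  | cons d ds =>
    rw [PySem.List.pyGet?_neg_one]
    cases hl : (d :: ds).getLast? with
    | none => simp at hl
    | some last =>
      by_cases ht : last = today
      · simp only [ht, ite_true, ne_eq, not_true_eq_false, ite_false]
        have hA := pvLoopA_eq (d :: ds) (d :: ds).length 0 1 (by omega)
        have h01 : (((0 : Nat) : Int) + 1) = 1 := by norm_num
        rw [h01, List.drop_zero] at hA
        rw [hA]
        -- rewrite A's totalized reversed numbers through the Option list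
        have hmm : (d :: ds).map pvDay = ((d :: ds).map pvDay?).map (Option.getD · 0) := by
          simp only [List.map_map]; rfl
        have hnlr : pvNoLazyRaise (((d :: ds).map pvDay?).reverse) := by
          have := hpre.2
          rw [hd] at this
          exact this (ht ▸ hl)
        rw [hmm, ← List.map_reverse, twc_eq_twcO _ hnlr]
        -- B's side
        simp only [List.map_cons, List.drop_succ_cons, List.drop_zero]
        rw [pvRunB_zip, goRunO_one]
        simp [List.reverse_cons]
      · simp [ht]

-- ===== VERDICT (by name: the statement is the Claim_ definition above) =====
theorem current_streak_spec : Claim_equal_current_streak := by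
  intro today lst _ hpre
  unfold Spec_current_streak
  exact ports_agree today lst hpre
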